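-- pv_equiv track=rewrite | github.com/kibrq/freegroup-utils | src/freegroup/core/core.py | iterable_normal_closure_embedding
-- ===== SOURCE A (Python) =====
-- from typing import List, Iterable
--
-- Word = List[int]
--
-- def reciprocal(word: Word) -> Word:
--     return [-factor for factor in word[::-1]]
--
-- def __check_is_sublist__(t: List, s: List):
--     if len(s) == 0:
--         return False
--     for i in range(len(s) - len(t)):
--         if all(map(lambda v: v[0] == v[1], zip(t, s[i:i+len(t)]))):
--             return True
--     return False
--
-- def iterable_normal_closure_embedding(base: Word, word: Word):
--     reduced = []
--     d_base, di_base = base * 2, reciprocal(base) * 2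
--     for f in word:
--         reduced.append(f)
--         if len(reduced) >= 2 and reduced[-2] == -reduced[-1]:
--             del reduced[-2:]
--         if len(reduced) >= len(base) and \
--             (__check_is_sublist__(reduced[-len(base):], d_base) or \
--                 __check_is_sublist__(reduced[-len(base):], di_base)):
--             del reduced[-len(base):]
--         yield reduced
-- ===== SOURCE B (Python) =====
-- # B: same generator contract as A (yields the live 'reduced' list after each step, as A does).
-- # Rotation test: a dict built once maps each letter to the rotation start positions (in base*2 and
-- # reciprocal(base)*2) beginning with it; per step only those few candidate windows are compared,
-- # element by element with early exit, replacing A's per-step scan that builds and compares every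
-- # window of both doubled words.
-- from typing import List
--
-- Word = List[int]
--
-- def reciprocal(word: Word) -> Word:
--     return [-factor for factor in word[::-1]]
--
-- def iterable_normal_closure_embedding(base: Word, word: Word):
--     b = len(base)
--     doubles = (base * 2, reciprocal(base) * 2)
--     starts = {}
--     for d in doubles:
--         for i, v in enumerate(d[:b]):
--             starts.setdefault(v, []).append((d, i))
--     reduced = []
--     for f in word:
--         if reduced and reduced[-1] == -f:
--             reduced.pop()
--         else:
--             reduced.append(f)
--         if b and len(reduced) >= b:
--             for d, i in starts.get(reduced[-b], ()):
--                 if all(reduced[j - b] == d[i + j] for j in range(b)):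
--                     del reduced[-b:]
--                     break
--         yield reduced
-- ===== Notes on version B (the rewrite author's own statement) =====
-- stated objective: alternative
-- what changed: B builds, once, a dict mapping each letter to the rotation start positions in base*2 and reciprocal(base)*2, and per step compares only those few candidate windows element by element with early exit, instead of A's scan that slices and compares every window of both doubled words; the cancellation step becomes a pop/append instead of append-then-delete.
import Mathlib
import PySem

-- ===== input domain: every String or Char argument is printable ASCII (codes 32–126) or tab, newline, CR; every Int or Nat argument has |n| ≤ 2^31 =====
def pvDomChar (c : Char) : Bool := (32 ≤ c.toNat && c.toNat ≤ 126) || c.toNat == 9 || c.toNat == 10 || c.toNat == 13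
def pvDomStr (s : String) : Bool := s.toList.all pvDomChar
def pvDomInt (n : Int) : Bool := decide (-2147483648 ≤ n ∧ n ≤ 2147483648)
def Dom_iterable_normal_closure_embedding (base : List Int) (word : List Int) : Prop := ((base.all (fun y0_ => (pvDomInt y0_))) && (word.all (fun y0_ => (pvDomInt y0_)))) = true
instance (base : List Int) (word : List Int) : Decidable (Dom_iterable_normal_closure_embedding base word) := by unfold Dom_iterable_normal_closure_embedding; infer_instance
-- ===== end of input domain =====

-- B indexes the rotation start positions of base*2 / reciprocal(base)*2 by their first letter once,
-- so each step compares only the few candidate windows, element by element with early exit, instead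
-- of scanning every window of both doubled words (objective: alternative). Both the Python A and the
-- Python B are generators that yield the single live 'reduced' list; the equivalence proved is
-- about the value list(gen) observes (the final list, once per yield).

-- ===== PORT A =====
-- reciprocal(word) = [-f for f in word[::-1]]
def pvReciprocal (w : List Int) : List Int :=
  ((PySem.List.slice? w none none (-1)).getD []).map (fun f => -f)

-- __check_is_sublist__(t, s)
def pvCheckIsSublist (t s : List Int) : Bool :=
  if s.length == 0 then false
  else (PySem.List.pyRange 0 ((s.length : Int) - (t.length : Int)) 1).any (fun i =>
    (t.zip (PySem.List.slice s (some i) (some (i + (t.length : Int))))).all (fun v => v.1 == v.2))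

-- the body of A's 'for f in word' loop acting on 'reduced'
def pvStepA (base d_base di_base : List Int) (reduced0 : List Int) (f : Int) : List Int :=
  let r1 := reduced0 ++ [f]
  let r2 := if 2 ≤ r1.length ∧
               PySem.List.pyGet? r1 (-2) = (PySem.List.pyGet? r1 (-1)).map (fun x => -x)
            then PySem.List.slice r1 none (some (-2)) else r1
  if (base.length : Int) ≤ (r2.length : Int) ∧
     (pvCheckIsSublist (PySem.List.slice r2 (some (-(base.length : Int))) none) d_base = true ∨
      pvCheckIsSublist (PySem.List.slice r2 (some (-(base.length : Int))) none) di_base = true)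
  then PySem.List.slice r2 none (some (-(base.length : Int))) else r2

def iterable_normal_closure_embedding (base : List Int) (word : List Int) : List (List Int) :=
  let d_base := base ++ base
  let di_base := pvReciprocal base ++ pvReciprocal base
  -- each 'yield reduced' yields the one mutable list; list(gen) sees the final list once per yield
  List.replicate word.length (word.foldl (pvStepA base d_base di_base) [])

-- ===== PORT B =====
-- starts = {}; for d in doubles: for i, v in enumerate(d[:b]): starts.setdefault(v, []).append((d, i))
def pvStarts (base : List Int) : PySem.Dict Int (List (List Int × Int)) :=
  [base ++ base, pvReciprocal base ++ pvReciprocal base].foldl (fun st d =>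
    (PySem.List.enumerate (PySem.List.slice d none (some (base.length : Int))) 0).foldl
      (fun st p => PySem.Dict.insert st p.2 (PySem.Dict.getD st p.2 [] ++ [(d, p.1)])) st)
    PySem.Dict.empty

-- the body of B's 'for f in word' loop acting on 'reduced'; the for/break over the candidate
-- list deletes on the first matching candidate, i.e. iff some candidate matches
def pvStepB (b : Nat) (starts : PySem.Dict Int (List (List Int × Int)))
    (reduced0 : List Int) (f : Int) : List Int :=
  let r := if reduced0 ≠ [] ∧ reduced0.getLast? = some (-f)
           then reduced0.dropLast else reduced0 ++ [f]
  if b ≠ 0 ∧ b ≤ r.length then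
    if (PySem.Dict.getD starts (PySem.List.pyGetD r (-(b : Int)) 0) []).any (fun p =>
         (PySem.List.pyRange 0 (b : Int) 1).all (fun j =>
           PySem.List.pyGetD r (j - (b : Int)) 0 == PySem.List.pyGetD p.1 (p.2 + j) 0))
    then r.take (r.length - b) else r
  else r

def iterable_normal_closure_embedding_alt (base : List Int) (word : List Int) : List (List Int) :=
  let starts := pvStarts base
  -- each 'yield reduced' yields the one mutable list; list(gen) sees the final list once per yield
  List.replicate word.length (word.foldl (pvStepB base.length starts) [])

-- ===== PRECONDITION & SPEC =====
def Spec_iterable_normal_closure_embedding (base : List Int) (word : List Int) (out : List (List Int)) : Prop := out = iterable_normal_closure_embedding_alt base word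
instance (base : List Int) (word : List Int) (out : List (List Int)) : Decidable (Spec_iterable_normal_closure_embedding base word out) := by unfold Spec_iterable_normal_closure_embedding; infer_instance

-- ===== CLAIM (what is proved, stated in full; the proofs are below) =====
def Claim_equal_iterable_normal_closure_embedding : Prop := ∀ (base : List Int) (word : List Int), Dom_iterable_normal_closure_embedding base word → Spec_iterable_normal_closure_embedding base word (iterable_normal_closure_embedding base word)

-- ===== LEMMAS AND PROOFS =====

theorem pvReciprocal_eq (w : List Int) : pvReciprocal w = w.reverse.map (fun f => -f) := by
  simp [pvReciprocal, PySem.List.slice?_none_none_neg_one]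

theorem pvReciprocal_length (w : List Int) : (pvReciprocal w).length = w.length := by
  simp [pvReciprocal_eq]

-- zip-all-eq on equal-length lists is list equality
theorem pv_zip_all_eq : ∀ (t u : List Int), t.length = u.length →
    (((t.zip u).all (fun v => v.1 == v.2)) = true ↔ t = u) := by
  intro t
  induction t with
  | nil => intro u h; cases u <;> simp_all
  | cons a t ih =>
      intro u h
      cases u with
      | nil => simp_all
      | cons c u =>
          simp only [List.zip_cons_cons, List.all_cons, Bool.and_eq_true, beq_iff_eq,
            List.cons.injEq]
          constructor
          · rintro ⟨h1, h2⟩; exact ⟨h1, (ih u (by simpa using h)).1 h2⟩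
          · rintro ⟨h1, h2⟩; exact ⟨h1, (ih u (by simpa using h)).2 h2⟩

-- drop-take of a doubled word is a rotation
theorem pv_drop_double_take (x : List Int) (k : Nat) (hk : k ≤ x.length) :
    ((x ++ x).drop k).take x.length = x.drop k ++ x.take k := by
  rw [List.drop_append_of_le_length hk]
  have h1 : x.length = (x.drop k).length + k := by simp; omega
  rw [h1, List.take_append, List.take_of_length_le (by omega), Nat.add_sub_cancel_left]

-- A's rotation scan over x ++ x recognises exactly the rotations of x
theorem pv_check_iff (t x : List Int) (b : Nat) (hb : 0 < b)
    (hx : x.length = b) (ht : t.length = b) :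
    (pvCheckIsSublist t (x ++ x) = true) ↔ ∃ k : Nat, k < b ∧ t = x.drop k ++ x.take k := by
  have hlen : (x ++ x).length = b + b := by simp [hx]
  unfold pvCheckIsSublist
  rw [if_neg (by simp [hlen]; omega)]
  rw [List.any_eq_true]
  constructor
  · rintro ⟨i, hi, hall⟩
    rw [PySem.List.mem_pyRange_one] at hi
    obtain ⟨hi0, hilt⟩ := hi
    have hilt' : i < (b : Int) := by
      simpa [hlen, ht] using hilt
    obtain ⟨k, rfl⟩ := Int.eq_ofNat_of_zero_le hi0
    have hk : k < b := by exact_mod_cast hilt'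
    refine ⟨k, hk, ?_⟩
    rw [ht] at hall
    rw [show ((k : Int) + (b : Nat)) = ((k + b : Nat) : Int) by push_cast; ring] at hall
    rw [PySem.List.slice_natCast] at hall
    have hslice : ((x ++ x).drop k).take (k + b - k) = x.drop k ++ x.take k := by
      rw [show k + b - k = b by omega, ← hx, pv_drop_double_take x k (by omega)]
    rw [hslice] at hall
    exact (pv_zip_all_eq _ _ (by simp [ht]; omega)).1 hall
  · rintro ⟨k, hk, rfl⟩
    refine ⟨(k : Int), ?_, ?_⟩
    · rw [PySem.List.mem_pyRange_one]
      constructor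
      · exact_mod_cast Nat.zero_le k
      · have : ((x ++ x).length : Int) - ((x.drop k ++ x.take k).length : Int) = (b : Int) := by
          simp [hlen, hx]; omega
        rw [this]; exact_mod_cast hk
    · have htlen : (x.drop k ++ x.take k).length = b := by simp [hx]; omega
      rw [htlen]
      rw [show ((k : Int) + (b : Nat)) = ((k + b : Nat) : Int) by push_cast; ring]
      rw [PySem.List.slice_natCast]
      rw [show k + b - k = b by omega, ← hx, pv_drop_double_take x k (by omega)]
      exact (pv_zip_all_eq _ _ rfl).2 rfl

-- the free-cancellation halves of the two step functions agree
theorem pv_cancel_eq (r : List Int) (f : Int) :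
    (if 2 ≤ (r ++ [f]).length ∧
        PySem.List.pyGet? (r ++ [f]) (-2) = (PySem.List.pyGet? (r ++ [f]) (-1)).map (fun x => -x)
     then PySem.List.slice (r ++ [f]) none (some (-2)) else r ++ [f])
    = (if r ≠ [] ∧ r.getLast? = some (-f) then r.dropLast else r ++ [f]) := by
  rcases List.eq_nil_or_concat r with rfl | ⟨q, a, rfl⟩
  · simp
  · have hget1 : PySem.List.pyGet? (q.concat a ++ [f]) (-1) = some f :=
      PySem.List.pyGet?_neg_one_append_singleton _ _
    have hlen : (q.concat a ++ [f]).length = q.length + 2 := by simp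
    have hget2 : PySem.List.pyGet? (q.concat a ++ [f]) (-2) = some a := by
      rw [PySem.List.pyGet?_neg_ofNat _ 2 (by omega) (by omega), hlen]
      simp [List.concat_eq_append, List.append_assoc]
    rw [hget1, hget2]
    have hslice : PySem.List.slice (q.concat a ++ [f]) none (some (-2)) = q := by
      rw [PySem.List.slice_to_neg_ofNat _ 2 (by omega), hlen]
      simp only [Nat.add_sub_cancel, List.concat_eq_append, List.append_assoc]
      have h2 : q.length = q.length + 0 := rfl
      rw [h2, List.take_append]
      simp
    by_cases hcase : a = -f
    · rw [if_pos ⟨by omega, by simp [hcase]⟩,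
        if_pos ⟨by simp, by simp [hcase]⟩, hslice]
      simp
    · rw [if_neg (by simp [hcase]), if_neg (by simp [List.concat_eq_append, hcase])]

-- the dict built by setdefault/append: lookups collect the matching (d, i) pairs in order
theorem pv_build_getD (d : List Int) (L : List (Int × Int)) :
    ∀ (st : PySem.Dict Int (List (List Int × Int))) (v : Int),
    PySem.Dict.getD
      (L.foldl (fun st p => PySem.Dict.insert st p.2
        (PySem.Dict.getD st p.2 [] ++ [(d, p.1)])) st) v []
    = PySem.Dict.getD st v [] ++ (L.filter (fun p => p.2 == v)).map (fun p => (d, p.1)) := by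
  induction L with
  | nil => intro st v; simp
  | cons p L ih =>
      intro st v
      rw [List.foldl_cons, ih, List.filter_cons]
      by_cases hv : p.2 = v
      · rw [if_pos (by simp [hv]), PySem.Dict.getD_insert]
        rw [if_pos hv.symm]
        simp [hv]
      · rw [if_neg (by simp [hv]), PySem.Dict.getD_insert, if_neg (fun h => hv h.symm)]

-- a lookup in pvStarts
theorem pv_starts_getD (base : List Int) (v : Int) :
    PySem.Dict.getD (pvStarts base) v []
    = ((PySem.List.enumerate (PySem.List.slice (base ++ base) none (some (base.length : Int))) 0).filter
        (fun p => p.2 == v)).map (fun p => (base ++ base, p.1))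
      ++ ((PySem.List.enumerate (PySem.List.slice (pvReciprocal base ++ pvReciprocal base) none
            (some (base.length : Int))) 0).filter
        (fun p => p.2 == v)).map (fun p => (pvReciprocal base ++ pvReciprocal base, p.1)) := by
  unfold pvStarts
  rw [List.foldl_cons, List.foldl_cons, List.foldl_nil, pv_build_getD, pv_build_getD]
  simp

theorem pv_take_double (x : List Int) : (x ++ x).take x.length = x := by
  have h : x.length = x.length + 0 := rfl
  rw [h, List.take_append]; simp

-- reduced[j - b] is the j-th letter of the final window
theorem pv_get_left (r2 : List Int) (b j : Nat) (hj : j < b) (hlen : b ≤ r2.length) :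
    PySem.List.pyGetD r2 ((j : Int) - (b : Int)) 0
      = (r2.drop (r2.length - b))[j]'(by simp; omega) := by
  have h1 : ((j : Int) - (b : Int)) = -(((b - j : Nat) : Int)) := by omega
  rw [h1, PySem.List.pyGetD_neg_natCast _ _ _ (by omega) (by omega)]
  rw [List.getElem_drop]
  have h3 : r2.length - (b - j) = r2.length - b + j := by omega
  simp only [h3]

-- d[i + j] is the j-th letter of the rotation starting at i
theorem pv_get_right (x : List Int) (b k j : Nat) (hx : x.length = b) (hk : k < b)
    (hj : j < b) :
    PySem.List.pyGetD (x ++ x) ((k : Int) + (j : Int)) 0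
      = (x.drop k ++ x.take k)[j]'(by simp; omega) := by
  rw [show ((k : Int) + (j : Int)) = ((k + j : Nat) : Int) by push_cast; ring,
    PySem.List.pyGetD_natCast, List.getD_eq_getElem _ _ (by simp; omega)]
  by_cases hcase : j < x.length - k
  · rw [List.getElem_append_left (by omega), List.getElem_append_left (by simp; omega),
      List.getElem_drop]
  · rw [List.getElem_append_right (by omega), List.getElem_append_right (by simp; omega),
      List.getElem_take]
    have h3 : j - (x.drop k).length = k + j - x.length := by simp; omega
    simp only [h3]

-- B's elementwise early-exit comparison against one candidate equals 'window = that rotation'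
theorem pv_all_iff (x r2 : List Int) (b k : Nat) (hx : x.length = b)
    (hlen : b ≤ r2.length) (hk : k < b) :
    ((PySem.List.pyRange 0 ((b : Nat) : Int) 1).all (fun j =>
        PySem.List.pyGetD r2 (j - ((b : Nat) : Int)) 0
          == PySem.List.pyGetD (x ++ x) ((k : Int) + j) 0)) = true
    ↔ r2.drop (r2.length - b) = x.drop k ++ x.take k := by
  rw [List.all_eq_true]
  constructor
  · intro h
    apply List.ext_getElem (by simp [hx]; omega)
    intro j hj1 hj2
    have hjb : j < b := by simp at hj1; omega
    have hmem : (j : Int) ∈ PySem.List.pyRange 0 ((b : Nat) : Int) 1 := by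
      rw [PySem.List.mem_pyRange_one]; constructor <;> [positivity; exact_mod_cast hjb]
    have hp := h (j : Int) hmem
    rw [pv_get_left r2 b j hjb hlen, pv_get_right x b k j hx hk hjb, beq_iff_eq] at hp
    exact hp
  · intro h j hj
    rw [PySem.List.mem_pyRange_one] at hj
    obtain ⟨hj0, hjb⟩ := hj
    obtain ⟨jn, rfl⟩ := Int.eq_ofNat_of_zero_le hj0
    have hjn : jn < b := by exact_mod_cast hjb
    rw [pv_get_left r2 b jn hjn hlen, pv_get_right x b k jn hx hk hjn, beq_iff_eq]
    simp only [h]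

-- B's candidate test over one doubled word equals 'the window is a rotation'
theorem pv_cand_iff (x r2 : List Int) (b : Nat) (hb : 0 < b) (hx : x.length = b)
    (hlen : b ≤ r2.length) :
    ((((PySem.List.enumerate (PySem.List.slice (x ++ x) none (some ((b : Nat) : Int))) 0).filter
        (fun p => p.2 == PySem.List.pyGetD r2 (-((b : Nat) : Int)) 0)).map
        (fun p => (x ++ x, p.1))).any (fun p =>
          (PySem.List.pyRange 0 ((b : Nat) : Int) 1).all (fun j =>
            PySem.List.pyGetD r2 (j - ((b : Nat) : Int)) 0
              == PySem.List.pyGetD p.1 (p.2 + j) 0))) = true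
    ↔ ∃ k : Nat, k < b ∧ r2.drop (r2.length - b) = x.drop k ++ x.take k := by
  have htake : PySem.List.slice (x ++ x) none (some ((b : Nat) : Int)) = x := by
    rw [PySem.List.slice_to_natCast, ← hx, pv_take_double]
  rw [htake, List.any_map, List.any_eq_true]
  constructor
  · rintro ⟨p, hp, hpred⟩
    rw [List.mem_filter, PySem.List.mem_enumerate_iff] at hp
    obtain ⟨⟨k, hk, rfl⟩, -⟩ := hp
    rw [hx] at hk
    simp only [Function.comp_apply, zero_add] at hpred
    exact ⟨k, hk, (pv_all_iff x r2 b k hx hlen hk).1 hpred⟩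
  · rintro ⟨k, hk, hrot⟩
    have hkey : PySem.List.pyGetD r2 (-((b : Nat) : Int)) 0 = x[k]'(by omega) := by
      rw [PySem.List.pyGetD_neg_natCast _ _ _ (by omega) (by omega)]
      have h0 : (r2.drop (r2.length - b))[0]'(by simp; omega)
          = (x.drop k ++ x.take k)[0]'(by simp; omega) := by
        simp only [hrot]
      rw [List.getElem_drop, List.getElem_append_left (by simp; omega),
        List.getElem_drop] at h0
      simpa using h0
    refine ⟨((k : Int), x[k]'(by omega)), ?_, ?_⟩
    · rw [List.mem_filter, PySem.List.mem_enumerate_iff]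
      exact ⟨⟨k, by omega, by simp⟩, by simp [hkey]⟩
    · simp only [Function.comp_apply]
      exact (pv_all_iff x r2 b k hx hlen hk).2 hrot

-- the two step functions agree on every state
theorem pv_step_eq (base : List Int) (r : List Int) (f : Int) :
    pvStepA base (base ++ base) (pvReciprocal base ++ pvReciprocal base) r f
      = pvStepB base.length (pvStarts base) r f := by
  simp only [pvStepA, pvStepB]
  rw [pv_cancel_eq]
  set r2 := (if r ≠ [] ∧ r.getLast? = some (-f) then r.dropLast else r ++ [f]) with hr2
  by_cases hb : base.length = 0
  · have hbase : base = [] := List.eq_nil_of_length_eq_zero hb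
    subst hbase
    simp [pvCheckIsSublist, pvReciprocal_eq]
  · by_cases hlen : base.length ≤ r2.length
    · have hslice_t : PySem.List.slice r2 (some (-(base.length : Int))) none
          = r2.drop (r2.length - base.length) :=
        PySem.List.slice_from_neg_natCast r2 base.length (by omega)
      have hslice_d : PySem.List.slice r2 none (some (-(base.length : Int)))
          = r2.take (r2.length - base.length) :=
        PySem.List.slice_to_neg_natCast r2 base.length (by omega)
      rw [hslice_t, hslice_d]
      have htlen : (r2.drop (r2.length - base.length)).length = base.length := by
        simp; omega
      have hcond : (pvCheckIsSublist (r2.drop (r2.length - base.length)) (base ++ base) = true ∨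
            pvCheckIsSublist (r2.drop (r2.length - base.length))
              (pvReciprocal base ++ pvReciprocal base) = true)
          ↔ ((PySem.Dict.getD (pvStarts base)
                (PySem.List.pyGetD r2 (-(base.length : Int)) 0) []).any (fun p =>
              (PySem.List.pyRange 0 (base.length : Int) 1).all (fun j =>
                PySem.List.pyGetD r2 (j - (base.length : Int)) 0
                  == PySem.List.pyGetD p.1 (p.2 + j) 0))) = true := by
        rw [pv_starts_getD, List.any_append, Bool.or_eq_true,
          pv_cand_iff base r2 base.length (by omega) rfl hlen,
          pv_cand_iff (pvReciprocal base) r2 base.length (by omega)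
            (pvReciprocal_length base) hlen,
          pv_check_iff _ base base.length (by omega) rfl htlen,
          pv_check_iff _ (pvReciprocal base) base.length (by omega)
            (pvReciprocal_length base) htlen]
      by_cases hc : (pvCheckIsSublist (r2.drop (r2.length - base.length)) (base ++ base) = true ∨
            pvCheckIsSublist (r2.drop (r2.length - base.length))
              (pvReciprocal base ++ pvReciprocal base) = true)
      · rw [if_pos ⟨by exact_mod_cast hlen, hc⟩, if_pos ⟨hb, hlen⟩, if_pos (hcond.1 hc)]
      · rw [if_neg (fun h => hc h.2), if_pos ⟨hb, hlen⟩, if_neg (fun h => hc (hcond.2 h))]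
    · rw [if_neg (fun h => hlen (by exact_mod_cast h.1)),
        if_neg (show ¬(base.length ≠ 0 ∧ base.length ≤ r2.length) from fun h => hlen h.2)]

-- ===== VERDICT (by name: the statement is the Claim_ definition above) =====
theorem iterable_normal_closure_embedding_spec : Claim_equal_iterable_normal_closure_embedding := by
  intro base word _
  unfold Spec_iterable_normal_closure_embedding
  unfold iterable_normal_closure_embedding iterable_normal_closure_embedding_alt
  have hstep : pvStepA base (base ++ base) (pvReciprocal base ++ pvReciprocal base)
      = pvStepB base.length (pvStarts base) :=
    funext fun r => funext fun f => pv_step_eq base r f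
  simp only [hstep]
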